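-- pv_equiv track=rewrite | github.com/GsusFC/brand3.0 | src/niche/classifier.py | _has_required_subtype_evidence
-- ===== SOURCE A (Python) =====
-- def _has_required_subtype_evidence(subtype_id: str, evidence: list[str]) -> bool:
--     if subtype_id != "workforce_marketplace":
--         return True
--
--     required_terms = {"marketplace", "workforce", "staffing", "shifts", "hourly"}
--     matched_terms = {
--         term
--         for term in required_terms
--         if any(f"'{term}'" in item and ("[web]" in item or "[identity]" in item) for item in evidence)
--     }
--     return len(matched_terms) >= 2
-- ===== SOURCE B (Python) =====
-- def _has_required_subtype_evidence(subtype_id: str, evidence: list[str]) -> bool: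
--     # Single pass over evidence with an early exit: accumulate the matched
--     # required terms per tagged item and return True as soon as two are seen.
--     if subtype_id != "workforce_marketplace":
--         return True
--     required_terms = ("marketplace", "workforce", "staffing", "shifts", "hourly")
--     matched = set()
--     for item in evidence:
--         if "[web]" in item or "[identity]" in item:
--             for term in required_terms:
--                 if f"'{term}'" in item:
--                     matched.add(term)
--             if len(matched) >= 2:
--                 return True
--     return False
-- ===== Notes on version B (the rewrite author's own statement) =====
-- stated objective: alternative
-- what changed: Inverted the traversal: instead of per-term repeated scans of the whole evidence list (a set comprehension with an inner any), B makes a single pass over evidence, accumulating a running matched-term set and returning True as soon as it reaches size 2.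
import Mathlib
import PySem

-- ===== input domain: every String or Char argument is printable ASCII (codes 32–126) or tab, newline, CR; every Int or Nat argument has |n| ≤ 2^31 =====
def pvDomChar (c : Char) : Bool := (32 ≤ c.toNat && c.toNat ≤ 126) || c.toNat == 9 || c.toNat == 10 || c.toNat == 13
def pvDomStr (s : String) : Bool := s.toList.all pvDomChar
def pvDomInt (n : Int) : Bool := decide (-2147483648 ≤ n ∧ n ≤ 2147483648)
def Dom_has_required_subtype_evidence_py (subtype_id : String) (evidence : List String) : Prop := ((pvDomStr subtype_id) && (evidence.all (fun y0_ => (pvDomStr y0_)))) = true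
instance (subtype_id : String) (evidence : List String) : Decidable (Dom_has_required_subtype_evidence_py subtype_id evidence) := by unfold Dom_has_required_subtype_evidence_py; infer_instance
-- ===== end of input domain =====

-- B replaces A's per-term scans of the whole evidence list by ONE pass over
-- evidence with a running matched-term set and an early exit at size 2
-- (objective: alternative decomposition; same result proved equal).

-- the five required terms (shared constant data of both programs)
def pvRequiredTerms : List String := ["marketplace", "workforce", "staffing", "shifts", "hourly"]

-- ===== PORT A =====
def has_required_subtype_evidence_py (subtype_id : String) (evidence : List String) : Bool :=
  if subtype_id != "workforce_marketplace" then true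
  else
    let required_terms : PySem.Set String := PySem.Set.ofList pvRequiredTerms
    let matched_terms : PySem.Set String :=
      PySem.Set.ofList (required_terms.filter (fun term =>
        evidence.any (fun item =>
          PySem.Str.isIn ("'" ++ term ++ "'") item &&
            (PySem.Str.isIn "[web]" item || PySem.Str.isIn "[identity]" item))))
    decide (2 ≤ PySem.Set.len matched_terms)

-- ===== PORT B =====
-- the evidence-first loop of Source B: per tagged item add the quoted terms it
-- contains to the running set, early-return once two terms are matched
def pvScanB (matched : PySem.Set String) : List String → Bool
  | [] => false
  | item :: rest =>
    if PySem.Str.isIn "[web]" item || PySem.Str.isIn "[identity]" item then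
      let matched' := pvRequiredTerms.foldl
        (fun m term => if PySem.Str.isIn ("'" ++ term ++ "'") item then PySem.Set.add m term else m)
        matched
      if 2 ≤ PySem.Set.len matched' then true else pvScanB matched' rest
    else pvScanB matched rest

def has_required_subtype_evidence_py_alt (subtype_id : String) (evidence : List String) : Bool :=
  if subtype_id != "workforce_marketplace" then true
  else pvScanB PySem.Set.empty evidence

-- ===== PRECONDITION & SPEC =====
def Spec_has_required_subtype_evidence_py (subtype_id : String) (evidence : List String) (out : Bool) : Prop := out = has_required_subtype_evidence_py_alt subtype_id evidence
instance (subtype_id : String) (evidence : List String) (out : Bool) : Decidable (Spec_has_required_subtype_evidence_py subtype_id evidence out) := by unfold Spec_has_required_subtype_evidence_py; infer_instance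

-- ===== CLAIM (what is proved, stated in full; the proofs are below) =====
def Claim_equal_has_required_subtype_evidence_py : Prop := ∀ (subtype_id : String) (evidence : List String), Dom_has_required_subtype_evidence_py subtype_id evidence → Spec_has_required_subtype_evidence_py subtype_id evidence (has_required_subtype_evidence_py subtype_id evidence)

-- ===== LEMMAS AND PROOFS =====

-- abbreviations for the two substring tests both programs perform
def pvTag (item : String) : Bool :=
  PySem.Str.isIn "[web]" item || PySem.Str.isIn "[identity]" item
def pvQ (t item : String) : Bool := PySem.Str.isIn ("'" ++ t ++ "'") item

-- B's inner per-item fold and the (exit-free) final matched set of B's loop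
def pvStep (item : String) (m : List String) : List String :=
  pvRequiredTerms.foldl (fun m term => if pvQ term item then PySem.Set.add m term else m) m

def pvFinal (m : List String) : List String → List String
  | [] => m
  | item :: rest => pvFinal (if pvTag item then pvStep item m else m) rest

theorem pv_mem_foldl_add (item : String) (l : List String) (m : List String) (t : String) :
    (t ∈ l.foldl (fun m term => if pvQ term item then PySem.Set.add m term else m) m) ↔
      t ∈ m ∨ (t ∈ l ∧ pvQ t item = true) := by
  induction l generalizing m with
  | nil => simp
  | cons a l ih =>
    simp only [List.foldl_cons, ih, List.mem_cons]
    by_cases h : pvQ a item = true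
    · simp [h, PySem.Set.mem_add]
      constructor
      · rintro ((h1 | rfl) | h2)
        · exact Or.inl h1
        · exact Or.inr ⟨Or.inl rfl, h⟩
        · exact Or.inr ⟨Or.inr h2.1, h2.2⟩
      · rintro (h1 | ⟨(rfl | h2), hq⟩)
        · exact Or.inl (Or.inl h1)
        · exact Or.inl (Or.inr rfl)
        · exact Or.inr ⟨h2, hq⟩
    · simp only [h]
      constructor
      · rintro (h1 | h2)
        · exact Or.inl h1
        · exact Or.inr ⟨Or.inr h2.1, h2.2⟩
      · rintro (h1 | ⟨(rfl | h2), hq⟩)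
        · exact Or.inl h1
        · exact absurd hq h
        · exact Or.inr ⟨h2, hq⟩

theorem pv_nodup_foldl_add (item : String) (l : List String) (m : List String)
    (hm : m.Nodup) :
    (l.foldl (fun m term => if pvQ term item then PySem.Set.add m term else m) m).Nodup := by
  induction l generalizing m with
  | nil => exact hm
  | cons a l ih =>
    simp only [List.foldl_cons]
    apply ih
    by_cases h : pvQ a item = true
    · simpa [h] using PySem.Set.nodup_add m a hm
    · simpa [h] using hm

theorem pv_len_le_step (item : String) (m : List String) :
    m.length ≤ (pvStep item m).length := by
  unfold pvStep
  generalize pvRequiredTerms = l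
  induction l generalizing m with
  | nil => simp
  | cons a l ih =>
    simp only [List.foldl_cons]
    refine le_trans ?_ (ih _)
    by_cases h : pvQ a item = true
    · simp only [h, if_true, PySem.Set.add]
      split <;> simp
    · simp [h]

theorem pv_mem_step (item : String) (m : List String) (t : String) :
    t ∈ pvStep item m ↔ t ∈ m ∨ (t ∈ pvRequiredTerms ∧ pvQ t item = true) :=
  pv_mem_foldl_add item pvRequiredTerms m t

theorem pv_nodup_step (item : String) (m : List String) (hm : m.Nodup) :
    (pvStep item m).Nodup :=
  pv_nodup_foldl_add item pvRequiredTerms m hm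

theorem pv_len_le_final (ev : List String) (m : List String) :
    m.length ≤ (pvFinal m ev).length := by
  induction ev generalizing m with
  | nil => simp [pvFinal]
  | cons item rest ih =>
    simp only [pvFinal]
    by_cases h : pvTag item = true
    · simpa [h] using le_trans (pv_len_le_step item m) (ih (pvStep item m))
    · simpa [h] using ih m

theorem pv_mem_final (ev : List String) (m : List String) (t : String) :
    t ∈ pvFinal m ev ↔
      t ∈ m ∨ ∃ item ∈ ev, pvTag item = true ∧ t ∈ pvRequiredTerms ∧ pvQ t item = true := by
  induction ev generalizing m with
  | nil => simp [pvFinal]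
  | cons item rest ih =>
    simp only [pvFinal]
    by_cases h : pvTag item = true
    · simp only [h, if_true, ih, pv_mem_step, List.mem_cons]
      constructor
      · rintro ((h1 | h2) | ⟨i, hi, hrest⟩)
        · exact Or.inl h1
        · exact Or.inr ⟨item, Or.inl rfl, h, h2⟩
        · exact Or.inr ⟨i, Or.inr hi, hrest⟩
      · rintro (h1 | ⟨i, (rfl | hi), hti, hmem⟩)
        · exact Or.inl (Or.inl h1)
        · exact Or.inl (Or.inr hmem)
        · exact Or.inr ⟨i, hi, hti, hmem⟩
    · simp only [h, ih, List.mem_cons]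
      constructor
      · rintro (h1 | ⟨i, hi, hrest⟩)
        · exact Or.inl h1
        · exact Or.inr ⟨i, Or.inr hi, hrest⟩
      · rintro (h1 | ⟨i, (rfl | hi), hti, hmem⟩)
        · exact Or.inl h1
        · exact absurd hti (by simpa using h)
        · exact Or.inr ⟨i, hi, hti, hmem⟩

theorem pv_nodup_final (ev : List String) (m : List String) (hm : m.Nodup) :
    (pvFinal m ev).Nodup := by
  induction ev generalizing m with
  | nil => simpa [pvFinal] using hm
  | cons item rest ih =>
    simp only [pvFinal]
    by_cases h : pvTag item = true
    · simpa [h] using ih _ (pv_nodup_step item m hm)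
    · simpa [h] using ih _ hm

-- Set.len is the integer length
theorem pv_len_eq (s : PySem.Set String) : PySem.Set.len s = (s.length : Int) := rfl

theorem pv_scan_eq_final (ev : List String) (m : List String) (hm : m.length < 2) :
    pvScanB m ev = decide (2 ≤ (pvFinal m ev).length) := by
  induction ev generalizing m with
  | nil =>
    have h0 : ¬ (2 ≤ m.length) := by omega
    simp [pvScanB, pvFinal, h0]
  | cons item rest ih =>
    simp only [pvScanB, pvFinal]
    have htag : (PySem.Str.isIn "[web]" item || PySem.Str.isIn "[identity]" item) = pvTag item := rfl
    have hstep : pvRequiredTerms.foldl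
        (fun m term => if PySem.Str.isIn ("'" ++ term ++ "'") item then PySem.Set.add m term else m) m
        = pvStep item m := by
      simp [pvStep, pvQ]
    rw [htag, hstep]
    by_cases h : pvTag item = true
    · simp only [h, if_true]
      by_cases h2 : 2 ≤ PySem.Set.len (pvStep item m)
      · have h2' : 2 ≤ (pvStep item m).length := by
          rw [pv_len_eq] at h2; exact_mod_cast h2
        have h3 : 2 ≤ (pvFinal (pvStep item m) rest).length :=
          le_trans h2' (pv_len_le_final rest (pvStep item m))
        simp [h3]
        exact Or.inl h2'
      · have h2' : (pvStep item m).length < 2 := by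
          rw [pv_len_eq] at h2; omega
        simp only [h2, if_false]
        exact ih _ h2'
    · simp only [h]
      exact ih m hm

-- A's matched-term filter over the term list
def pvFilterA (ev : List String) : List String :=
  pvRequiredTerms.filter (fun term =>
    ev.any (fun item =>
      PySem.Str.isIn ("'" ++ term ++ "'") item &&
        (PySem.Str.isIn "[web]" item || PySem.Str.isIn "[identity]" item)))

theorem pv_nodup_terms : pvRequiredTerms.Nodup := by decide

theorem pv_final_perm_filter (ev : List String) :
    (pvFinal [] ev).Perm (pvFilterA ev) := by
  unfold pvFilterA
  rw [List.perm_ext_iff_of_nodup (pv_nodup_final ev [] (by simp))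
      (pv_nodup_terms.filter _)]
  intro t
  rw [pv_mem_final, List.mem_filter]
  simp only [List.mem_nil_iff, false_or, List.any_eq_true, Bool.and_eq_true]
  constructor
  · rintro ⟨i, hi, hti, hmem, hq⟩
    exact ⟨hmem, i, hi, hq, hti⟩
  · rintro ⟨hmem, i, hi, hq, hti⟩
    exact ⟨i, hi, hti, hmem, hq⟩

-- ===== VERDICT (by name: the statement is the Claim_ definition above) =====
theorem has_required_subtype_evidence_py_spec : Claim_equal_has_required_subtype_evidence_py := by
  unfold Claim_equal_has_required_subtype_evidence_py
  intro subtype_id evidence _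
  unfold Spec_has_required_subtype_evidence_py
  unfold has_required_subtype_evidence_py has_required_subtype_evidence_py_alt
  by_cases hs : (subtype_id != "workforce_marketplace") = true
  · simp [hs]
  · rw [show (subtype_id != "workforce_marketplace") = false from by simpa using hs]
    simp only [Bool.false_eq_true, if_false]
    rw [show (PySem.Set.empty : PySem.Set String) = ([] : List String) from rfl]
    rw [pv_scan_eq_final evidence [] (by simp)]
    rw [PySem.Set.ofList_eq_self_of_nodup pvRequiredTerms pv_nodup_terms]
    rw [PySem.Set.ofList_eq_self_of_nodup _ (pv_nodup_terms.filter _)]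
    rw [pv_len_eq]
    have hperm := (pv_final_perm_filter evidence).length_eq
    unfold pvFilterA at hperm
    rw [← hperm]
    simp only [decide_eq_decide]
    omega
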